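-- pv_equiv track=rewrite | github.com/Do-heewan/Do_ProgrammingTest | 프로그래머스/1/258712. 가장 많이 받은 선물/가장 많이 받은 선물.py | solution
-- ===== SOURCE A (Python) =====
-- def solution(friends, gifts):
--     mapping = {}
--     for i in range(len(friends)):
--         mapping[friends[i]] = i
--
--     gift = [[0 for _ in range(len(friends))] for _ in range(len(friends))] # 리스트 초기화
--
--     for g in gifts:
--         a, b = g.split()
--         gift[mapping[a]][mapping[b]] += 1
--
--     # 준 선물 수
--     given_gifts = []
--     for i in range(len(friends)):
--         given_gift = 0
--         for j in gift[i]: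
--             given_gift += j
--         given_gifts.append(given_gift)
--
--     # 받은 선물 수
--     taken_gifts = []
--     for i in range(len(friends)):
--         taken_gift = 0
--         for j in range(len(friends)):
--             taken_gift += gift[j][i]
--         taken_gifts.append(taken_gift)
--
--     score_gift = []
--     for i in range(len(given_gifts)):
--         score_gift.append(given_gifts[i] - taken_gifts[i])
--
--     # 다음 달 받을 선물 수
--     next_month = [0] * len(friends)
--     for i in range(len(friends)):
--         for j in range(i + 1, len(friends)):  # (i, j) 쌍만 비교
--             if gift[i][j] > gift[j][i]:
--                 next_month[i] += 1
--             elif gift[i][j] < gift[j][i]: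
--                 next_month[j] += 1
--             else:
--                 if score_gift[i] > score_gift[j]:
--                     next_month[i] += 1
--                 elif score_gift[i] < score_gift[j]:
--                     next_month[j] += 1
--                 # 같으면 아무도 선물 받지 않음
--
--     return max(next_month)
-- ===== SOURCE B (Python) =====
-- def solution(friends, gifts):
--     # Score-rank baseline + sparse corrections, instead of a dense matrix round-robin:
--     # score is accumulated directly while parsing; wins[i] starts as the number of
--     # strictly smaller scores (the outcome of every pair with balanced gift counts);
--     # then only the pairs whose signed gift difference is nonzero are patched.
--     idx = {}
--     for i, name in enumerate(friends):
--         idx[name] = i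
--     n = len(friends)
--     score = [0] * n
--     net = {}  # (min,max) -> (gifts small->big) - (gifts big->small)
--     for g in gifts:
--         a, b = g.split()
--         ia, ib = idx[a], idx[b]
--         score[ia] += 1
--         score[ib] -= 1
--         if ia < ib:
--             net[(ia, ib)] = net.get((ia, ib), 0) + 1
--         elif ib < ia:
--             net[(ib, ia)] = net.get((ib, ia), 0) - 1
--     wins = [sum(1 for s2 in score if s2 < s) for s in score]
--     for (i, j), d in net.items():
--         if d > 0:
--             w, l = i, j
--         elif d < 0:
--             w, l = j, i
--         else:
--             continue
--         if score[w] < score[l]: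
--             wins[w] += 1
--             wins[l] -= 1
--         elif score[w] == score[l]:
--             wins[w] += 1
--     return max(wins)
-- ===== Notes on version B (the rewrite author's own statement) =====
-- stated objective: alternative
-- what changed: B replaces A's dense n-by-n matrix and explicit round-robin tournament by a score-rank baseline plus sparse corrections: while parsing it accumulates each person's score directly and a signed net-gift dictionary keyed by the sorted pair, sets wins[i] to the number of strictly smaller scores (the outcome of every balanced pair), and then patches only the dictionary entries with a nonzero net difference.
import Mathlib
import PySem

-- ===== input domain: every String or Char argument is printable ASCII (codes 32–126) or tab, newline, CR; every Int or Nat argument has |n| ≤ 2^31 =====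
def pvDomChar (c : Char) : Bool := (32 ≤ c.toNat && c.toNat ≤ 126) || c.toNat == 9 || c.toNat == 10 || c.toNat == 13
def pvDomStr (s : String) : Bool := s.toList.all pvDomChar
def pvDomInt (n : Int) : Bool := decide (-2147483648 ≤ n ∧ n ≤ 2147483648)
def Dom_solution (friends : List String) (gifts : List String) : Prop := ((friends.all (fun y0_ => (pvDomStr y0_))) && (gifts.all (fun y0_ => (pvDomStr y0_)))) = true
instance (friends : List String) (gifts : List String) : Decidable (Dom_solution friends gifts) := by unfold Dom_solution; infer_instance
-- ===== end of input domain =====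

-- B replaces A's dense n×n matrix and explicit round-robin tournament by a score-rank
-- baseline (wins[i] = number of strictly smaller scores) patched only at the sparse
-- dictionary entries whose signed net gift difference is nonzero (objective: alternative).

-- ===== PORT A =====
-- A-side helpers: one helper per Python statement of A (mapping, gift matrix, the three
-- summation passes, next_month); each is a literal transliteration of the corresponding loop.
def solA_mapping (friends : List String) : PySem.Dict String Int :=
  (PySem.List.pyRange 0 (PySem.List.len friends) 1).foldl
    (fun m i => m.insert (PySem.List.pyGetD friends i "") i) PySem.Dict.empty

def solA_gift0 (friends : List String) : List (List Int) :=
  (PySem.List.pyRange 0 (PySem.List.len friends) 1).map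
    (fun _ => (PySem.List.pyRange 0 (PySem.List.len friends) 1).map (fun _ => (0 : Int)))

def solA_gift (friends : List String) (gifts : List String) : List (List Int) :=
  gifts.foldl (fun G g =>
    let parts := PySem.Str.split₀ g
    let a := PySem.List.pyGetD parts 0 ""
    let b := PySem.List.pyGetD parts 1 ""
    let ia := (solA_mapping friends).getD a 0
    let ib := (solA_mapping friends).getD b 0
    let row := PySem.List.pyGetD G ia []
    PySem.List.pySetD G ia (PySem.List.pySetD row ib (PySem.List.pyGetD row ib 0 + 1)))
    (solA_gift0 friends)

def solA_given (friends : List String) (gifts : List String) : List Int :=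
  (PySem.List.pyRange 0 (PySem.List.len friends) 1).foldl
    (fun acc i => acc ++ [(PySem.List.pyGetD (solA_gift friends gifts) i []).foldl
      (fun s j => s + j) 0]) []

def solA_taken (friends : List String) (gifts : List String) : List Int :=
  (PySem.List.pyRange 0 (PySem.List.len friends) 1).foldl
    (fun acc i => acc ++ [(PySem.List.pyRange 0 (PySem.List.len friends) 1).foldl
      (fun s j => s + PySem.List.pyGetD (PySem.List.pyGetD (solA_gift friends gifts) j []) i 0) 0]) []

def solA_score (friends : List String) (gifts : List String) : List Int :=
  (PySem.List.pyRange 0 (PySem.List.len (solA_given friends gifts)) 1).foldl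
    (fun acc i => acc ++ [PySem.List.pyGetD (solA_given friends gifts) i 0
      - PySem.List.pyGetD (solA_taken friends gifts) i 0]) []

def solA_next (friends : List String) (gifts : List String) : List Int :=
  (PySem.List.pyRange 0 (PySem.List.len friends) 1).foldl (fun nm i =>
    (PySem.List.pyRange (i + 1) (PySem.List.len friends) 1).foldl (fun nm j =>
      let gij := PySem.List.pyGetD (PySem.List.pyGetD (solA_gift friends gifts) i []) j 0
      let gji := PySem.List.pyGetD (PySem.List.pyGetD (solA_gift friends gifts) j []) i 0
      if gij > gji then PySem.List.pySetD nm i (PySem.List.pyGetD nm i 0 + 1)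
      else if gij < gji then PySem.List.pySetD nm j (PySem.List.pyGetD nm j 0 + 1)
      else if PySem.List.pyGetD (solA_score friends gifts) i 0
          > PySem.List.pyGetD (solA_score friends gifts) j 0 then
        PySem.List.pySetD nm i (PySem.List.pyGetD nm i 0 + 1)
      else if PySem.List.pyGetD (solA_score friends gifts) i 0
          < PySem.List.pyGetD (solA_score friends gifts) j 0 then
        PySem.List.pySetD nm j (PySem.List.pyGetD nm j 0 + 1)
      else nm) nm) (List.replicate friends.length 0)

-- max(next_month) raises ValueError on an empty list; Pre_ excludes friends = []
def solution (friends : List String) (gifts : List String) : Int :=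
  (PySem.List.max? (solA_next friends gifts) (fun y => y)).getD 0

-- ===== PORT B =====
-- B-side helpers, following Source B: the name→index dict; ONE parsing pass accumulating the
-- score list (+1 giver, -1 receiver) and the signed net dictionary keyed by the sorted
-- pair; the score-rank baseline; and the correction step applied per dictionary item.
def solB_idx (friends : List String) : PySem.Dict String Int :=
  (PySem.List.enumerate friends).foldl (fun d p => d.insert p.2 p.1) PySem.Dict.empty

def solB_state (friends : List String) (gifts : List String) :
    List Int × PySem.Dict (Int × Int) Int :=
  gifts.foldl (fun st g =>
    let parts := PySem.Str.split₀ g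
    let ia := (solB_idx friends).getD (PySem.List.pyGetD parts 0 "") 0
    let ib := (solB_idx friends).getD (PySem.List.pyGetD parts 1 "") 0
    let sc1 := PySem.List.pySetD st.1 ia (PySem.List.pyGetD st.1 ia 0 + 1)
    let sc2 := PySem.List.pySetD sc1 ib (PySem.List.pyGetD sc1 ib 0 - 1)
    let net :=
      if ia < ib then st.2.insert (ia, ib) (st.2.getD (ia, ib) 0 + 1)
      else if ib < ia then st.2.insert (ib, ia) (st.2.getD (ib, ia) 0 - 1)
      else st.2
    (sc2, net))
    (List.replicate friends.length 0, PySem.Dict.empty)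

-- wins = [sum(1 for s2 in score if s2 < s) for s in score]
def solB_base (score : List Int) : List Int :=
  score.map (fun s => ((score.countP (fun s2 => decide (s2 < s)) : Nat) : Int))

-- the body of the correction loop: wins[w] += 1 / wins[l] -= 1 per score comparison
def solB_adjust (score wins : List Int) (w l : Int) : List Int :=
  if PySem.List.pyGetD score w 0 < PySem.List.pyGetD score l 0 then
    let wins1 := PySem.List.pySetD wins w (PySem.List.pyGetD wins w 0 + 1)
    PySem.List.pySetD wins1 l (PySem.List.pyGetD wins1 l 0 - 1)
  else if PySem.List.pyGetD score w 0 == PySem.List.pyGetD score l 0 then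
    PySem.List.pySetD wins w (PySem.List.pyGetD wins w 0 + 1)
  else wins

def solB_wins (friends : List String) (gifts : List String) : List Int :=
  ((solB_state friends gifts).2.items).foldl (fun wins pd =>
    if pd.2 > 0 then solB_adjust (solB_state friends gifts).1 wins pd.1.1 pd.1.2
    else if pd.2 < 0 then solB_adjust (solB_state friends gifts).1 wins pd.1.2 pd.1.1
    else wins)
    (solB_base (solB_state friends gifts).1)

-- max(wins) raises ValueError on an empty list; Pre_ excludes friends = []
def solution_alt (friends : List String) (gifts : List String) : Int :=
  (PySem.List.max? (solB_wins friends gifts) (fun y => y)).getD 0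

-- ===== PRECONDITION & SPEC =====
-- Pre_ excludes exactly the raising inputs: empty friends (max([]) is a ValueError), a gift
-- line that does not split into exactly two words (unpacking ValueError), and a gift word
-- that is not a friend's name (KeyError in mapping).
def Pre_solution (friends : List String) (gifts : List String) : Prop :=
  friends ≠ [] ∧ ∀ g ∈ gifts,
    (PySem.Str.split₀ g).length = 2 ∧
    (PySem.Str.split₀ g).getD 0 "" ∈ friends ∧ (PySem.Str.split₀ g).getD 1 "" ∈ friends
instance (friends : List String) (gifts : List String) : Decidable (Pre_solution friends gifts) := by
  unfold Pre_solution; infer_instance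
def pvWitness_solution : List String × List String := (["muzi", "frodo"], ["muzi frodo", "frodo muzi", "muzi frodo"])
def Spec_solution (friends : List String) (gifts : List String) (out : Int) : Prop := out = solution_alt friends gifts
instance (friends : List String) (gifts : List String) (out : Int) : Decidable (Spec_solution friends gifts out) := by unfold Spec_solution; infer_instance

-- ===== CLAIM (what is proved, stated in full; the proofs are below) =====
def Claim_equal_solution : Prop := ∀ (friends : List String) (gifts : List String), Dom_solution friends gifts → Pre_solution friends gifts → Spec_solution friends gifts (solution friends gifts)

-- ===== LEMMAS AND PROOFS =====

-- Canonical description shared by both ports: the parsed list of (giver,receiver) index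
-- pairs, counts/scores over it, the "beats" relation and per-person win counts.
def pvParse (M : PySem.Dict String Int) (g : String) : Int × Int :=
  (M.getD (PySem.List.pyGetD (PySem.Str.split₀ g) 0 "") 0,
   M.getD (PySem.List.pyGetD (PySem.Str.split₀ g) 1 "") 0)

def pvP (friends gifts : List String) : List (Int × Int) := gifts.map (pvParse (solA_mapping friends))

def pvC (P : List (Int × Int)) (i j : Int) : Int := (P.count (i, j) : Nat)

def pvS (P : List (Int × Int)) (i : Int) : Int :=
  (P.countP (fun p => p.1 == i) : Nat) - ((P.countP (fun p => p.2 == i) : Nat) : Int)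

def pvB (P : List (Int × Int)) (i j : Int) : Bool :=
  decide (pvC P i j > pvC P j i) || (decide (pvC P i j = pvC P j i) && decide (pvS P i > pvS P j))

def pvWins (P : List (Int × Int)) (N : Nat) (i : Int) : Int :=
  (((PySem.List.pyRange 0 (N : Int) 1).countP (fun j => j != i && pvB P i j) : Nat) : Int)

def pvRes (friends gifts : List String) : Int :=
  (PySem.List.max? ((PySem.List.pyRange 0 (friends.length : Int) 1).map
      (fun i => pvWins (pvP friends gifts) friends.length i)) (fun y => y)).getD 0

-- A's matrix increment, A's next_month increment/step, and the contribution predicate.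
def pvUpd (G : List (List Int)) (p : Int × Int) : List (List Int) :=
  PySem.List.pySetD G p.1 (PySem.List.pySetD (PySem.List.pyGetD G p.1 [])
    p.2 (PySem.List.pyGetD (PySem.List.pyGetD G p.1 []) p.2 0 + 1))

def pvInc (nm : List Int) (k : Int) : List Int :=
  PySem.List.pySetD nm k (PySem.List.pyGetD nm k 0 + 1)

def pvStepNM (b : Int → Int → Bool) (nm : List Int) (p : Int × Int) : List Int :=
  if b p.1 p.2 then pvInc nm p.1 else if b p.2 p.1 then pvInc nm p.2 else nm

def pvQ (b : Int → Int → Bool) (k : Int) (p : Int × Int) : Bool :=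
  if b p.1 p.2 then p.1 == k else if b p.2 p.1 then p.2 == k else false

-- the triangular pair list A's double loop walks
def pvL (N : Nat) : List (Int × Int) :=
  (PySem.List.pyRange 0 (N : Int) 1).flatMap
    (fun i => (PySem.List.pyRange (i + 1) (N : Int) 1).map (fun j => (i, j)))

-- every value the name→index dict can yield lies in [0, n) (incl. the 0 default), n > 0
lemma pv_dict_fold_bounds (N : Int) (l : List Int) (hl : ∀ i ∈ l, 0 ≤ i ∧ i < N)
    (f : Int → String) (d : PySem.Dict String Int)
    (hd : ∀ k, 0 ≤ d.getD k 0 ∧ d.getD k 0 < N) :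
    ∀ k, 0 ≤ (l.foldl (fun m i => m.insert (f i) i) d).getD k 0 ∧
      (l.foldl (fun m i => m.insert (f i) i) d).getD k 0 < N := by
  induction l generalizing d with
  | nil => simpa using hd
  | cons x t ih =>
    simp only [List.foldl_cons]
    refine ih (fun i hi => hl i (List.mem_cons_of_mem _ hi)) _ ?_
    intro k'
    rw [PySem.Dict.getD_insert]
    split_ifs
    · exact hl x (by simp)
    · exact hd k'

lemma pv_map_bounds (friends : List String) (h : friends ≠ []) :
    ∀ k, 0 ≤ (solA_mapping friends).getD k 0 ∧ (solA_mapping friends).getD k 0 < (friends.length : Int) := by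
  intro k
  unfold solA_mapping
  refine pv_dict_fold_bounds _ _ ?_ _ PySem.Dict.empty ?_ k
  · intro i hi
    rw [PySem.List.mem_pyRange_one] at hi
    simpa using hi
  · intro k'
    rw [PySem.Dict.getD_empty]
    have : 0 < friends.length := List.length_pos_iff.mpr h
    exact ⟨le_refl 0, by exact_mod_cast this⟩

lemma pv_parse_bounds (friends gifts : List String) (h : friends ≠ []) :
    ∀ p ∈ pvP friends gifts, 0 ≤ p.1 ∧ p.1 < (friends.length : Int) ∧
      0 ≤ p.2 ∧ p.2 < (friends.length : Int) := by
  intro p hp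
  unfold pvP at hp
  obtain ⟨g, -, rfl⟩ := List.mem_map.mp hp
  exact ⟨(pv_map_bounds friends h _).1, (pv_map_bounds friends h _).2,
    (pv_map_bounds friends h _).1, (pv_map_bounds friends h _).2⟩

lemma pv_sum_set_add_one : ∀ (l : List Int) (n : Nat), n < l.length →
    (l.set n (l.getD n 0 + 1)).sum = l.sum + 1 := by
  intro l
  induction l with
  | nil => intro n h; simp at h
  | cons a t ih =>
    intro n h
    cases n with
    | zero => simp; ring
    | succ m =>
      simp only [List.set_cons_succ, List.sum_cons, List.getD_cons_succ]
      rw [ih m (by simpa using h)]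
      ring

lemma pv_getD_setD {α : Type} (v : List α) (a i : Int) (x d : α) (ha0 : 0 ≤ a)
    (hi0 : 0 ≤ i) (hi : i < (v.length : Int)) :
    PySem.List.pyGetD (PySem.List.pySetD v a x) i d = if a = i then x else PySem.List.pyGetD v i d := by
  rw [PySem.List.pySetD_of_nonneg v x ha0,
      PySem.List.pyGetD_eq_getElem _ _ hi0 (by simpa using hi),
      List.getElem_set]
  split_ifs with h1 h2 h3
  · rfl
  · exact absurd (by omega : a = i) h2
  · exact absurd (by omega : a.toNat = i.toNat) h1
  · rw [PySem.List.pyGetD_eq_getElem _ _ hi0 hi]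

lemma pvStepNM_congr (b b' : Int → Int → Bool) (nm : List Int) (p : Int × Int)
    (h12 : b p.1 p.2 = b' p.1 p.2) (h21 : b p.2 p.1 = b' p.2 p.1) :
    pvStepNM b nm p = pvStepNM b' nm p := by
  simp [pvStepNM, h12, h21]

lemma pv_upd_length (G : List (List Int)) (p : Int × Int) : (pvUpd G p).length = G.length := by
  unfold pvUpd; rw [PySem.List.length_pySetD]

lemma pv_row_length (N : Nat) (G : List (List Int)) (a : Int)
    (hlen : G.length = N) (hr : ∀ r ∈ G, r.length = N) (ha0 : 0 ≤ a) (ha : a < (N : Int)) :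
    (PySem.List.pyGetD G a []).length = N :=
  hr _ (PySem.List.pyGetD_mem G [] (by unfold PySem.Raise.InRange; omega))

lemma pv_upd_rows (N : Nat) (G : List (List Int)) (p : Int × Int)
    (hlen : G.length = N) (hr : ∀ r ∈ G, r.length = N)
    (hp1 : 0 ≤ p.1) (hp1' : p.1 < (N : Int)) :
    ∀ r ∈ pvUpd G p, r.length = N := by
  intro r hrm
  unfold pvUpd at hrm
  rw [PySem.List.pySetD_of_nonneg _ _ hp1] at hrm
  rcases List.mem_or_eq_of_mem_set hrm with hmem | rfl
  · exact hr r hmem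
  · rw [PySem.List.length_pySetD]
    exact pv_row_length N G p.1 hlen hr hp1 hp1'

lemma pv_upd_entry (N : Nat) (G : List (List Int)) (p : Int × Int) (i j : Int)
    (hlen : G.length = N) (hr : ∀ r ∈ G, r.length = N)
    (hp1 : 0 ≤ p.1) (hp1' : p.1 < (N : Int)) (hp2 : 0 ≤ p.2) (hp2' : p.2 < (N : Int))
    (hi : 0 ≤ i) (hi' : i < (N : Int)) (hj : 0 ≤ j) (hj' : j < (N : Int)) :
    PySem.List.pyGetD (PySem.List.pyGetD (pvUpd G p) i []) j 0
      = PySem.List.pyGetD (PySem.List.pyGetD G i []) j 0 + if p = (i, j) then 1 else 0 := by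
  rcases p with ⟨p1, p2⟩
  simp only at hp1 hp1' hp2 hp2' ⊢
  have hrow1 : (PySem.List.pyGetD G p1 []).length = N := pv_row_length N G p1 hlen hr hp1 hp1'
  unfold pvUpd
  dsimp only
  rw [pv_getD_setD G p1 i _ [] hp1 hi (by omega)]
  by_cases hpi : p1 = i
  · subst hpi
    rw [if_pos rfl, pv_getD_setD _ p2 j _ 0 hp2 hj (by omega)]
    by_cases hpj : p2 = j
    · subst hpj
      simp
    · simp [hpj, Prod.ext_iff]
  · rw [if_neg hpi]
    simp [Prod.ext_iff, hpi]

lemma pv_upd_rowsum (N : Nat) (G : List (List Int)) (p : Int × Int) (i : Int)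
    (hlen : G.length = N) (hr : ∀ r ∈ G, r.length = N)
    (hp1 : 0 ≤ p.1) (hp1' : p.1 < (N : Int)) (hp2 : 0 ≤ p.2) (hp2' : p.2 < (N : Int))
    (hi : 0 ≤ i) (hi' : i < (N : Int)) :
    (PySem.List.pyGetD (pvUpd G p) i []).sum
      = (PySem.List.pyGetD G i []).sum + if p.1 = i then 1 else 0 := by
  rcases p with ⟨p1, p2⟩
  simp only at hp1 hp1' hp2 hp2' ⊢
  have hrow1 : (PySem.List.pyGetD G p1 []).length = N := pv_row_length N G p1 hlen hr hp1 hp1'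
  unfold pvUpd
  dsimp only
  rw [pv_getD_setD G p1 i _ [] hp1 hi (by omega)]
  by_cases hpi : p1 = i
  · subst hpi
    rw [if_pos rfl, if_pos rfl, PySem.List.pySetD_of_nonneg _ _ hp2]
    have hs := pv_sum_set_add_one (PySem.List.pyGetD G p1 []) p2.toNat (by omega)
    rw [PySem.List.pyGetD_eq_getElem _ 0 hp2 (by omega),
        ← List.getD_eq_getElem (PySem.List.pyGetD G p1 []) 0 (by omega)]
    exact hs
  · simp [hpi]

-- shape preservation and entry/row-sum formulas for A's matrix loop
lemma pv_matrix_fold (N : Nat) (Q : List (Int × Int))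
    (hQ : ∀ p ∈ Q, 0 ≤ p.1 ∧ p.1 < (N : Int) ∧ 0 ≤ p.2 ∧ p.2 < (N : Int)) :
    ∀ M : List (List Int), M.length = N → (∀ r ∈ M, r.length = N) →
      (Q.foldl pvUpd M).length = N ∧ (∀ r ∈ Q.foldl pvUpd M, r.length = N) ∧
      (∀ i : Int, 0 ≤ i → i < (N : Int) →
        (PySem.List.pyGetD (Q.foldl pvUpd M) i []).sum
          = (PySem.List.pyGetD M i []).sum + (Q.countP (fun p => p.1 == i) : Nat)) ∧
      (∀ i j : Int, 0 ≤ i → i < (N : Int) → 0 ≤ j → j < (N : Int) →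
        PySem.List.pyGetD (PySem.List.pyGetD (Q.foldl pvUpd M) i []) j 0
          = PySem.List.pyGetD (PySem.List.pyGetD M i []) j 0 + (Q.count (i, j) : Nat)) := by
  induction Q with
  | nil =>
    intro M h1 h2
    refine ⟨h1, h2, ?_, ?_⟩ <;> intros <;> simp
  | cons q t ih =>
    intro M h1 h2
    have hq := hQ q (by simp)
    have h1' : (pvUpd M q).length = N := by rw [pv_upd_length]; exact h1
    have h2' := pv_upd_rows N M q h1 h2 hq.1 hq.2.1
    obtain ⟨ha, hb, hc, hd⟩ := ih (fun p hp => hQ p (by simp [hp])) (pvUpd M q) h1' h2'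
    simp only [List.foldl_cons]
    refine ⟨ha, hb, ?_, ?_⟩
    · intro i h0 hiN
      rw [hc i h0 hiN, pv_upd_rowsum N M q i h1 h2 hq.1 hq.2.1 hq.2.2.1 hq.2.2.2 h0 hiN,
          List.countP_cons]
      by_cases he : q.1 = i <;> simp [he] <;> push_cast <;> ring
    · intro i j h0 hiN hj0 hjN
      rw [hd i j h0 hiN hj0 hjN,
          pv_upd_entry N M q i j h1 h2 hq.1 hq.2.1 hq.2.2.1 hq.2.2.2 h0 hiN hj0 hjN,
          List.count_cons]
      by_cases he : q = (i, j) <;> simp [he] <;> push_cast <;> ring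

-- the column sum of pair counts is the receiver count
lemma pv_sum_count_snd (N : Nat) (Q : List (Int × Int))
    (hQ : ∀ p ∈ Q, 0 ≤ p.1 ∧ p.1 < (N : Int)) (i : Int) :
    (((PySem.List.pyRange 0 (N : Int) 1).map (fun j => ((Q.count (j, i) : Nat) : Int))).sum)
      = (Q.countP (fun p => p.2 == i) : Nat) := by
  induction Q with
  | nil => simp
  | cons q t ih =>
    have hq := hQ q (by simp)
    have ih' := ih (fun p hp => hQ p (by simp [hp]))
    simp only [List.count_cons, List.countP_cons]
    have hrw : ∀ j : Int, ((List.count (j, i) t + if (q == (j, i)) = true then 1 else 0 : Nat) : Int)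
        = ((List.count (j, i) t : Nat) : Int) + (if q = (j, i) then (1 : Int) else 0) := by
      intro j
      by_cases he : q = (j, i) <;> simp [he]
    simp only [hrw]
    rw [PySem.List.sum_map_add_int, ih']
    by_cases hqi : q.2 = i
    · have hcond : ∀ j : Int, (if q = (j, i) then (1 : Int) else 0)
          = if (fun j => q.1 == j) j = true then (1 : Int) else 0 := by
        intro j
        rcases q with ⟨q1, q2⟩
        simp only at hqi
        subst hqi
        by_cases he : q1 = j
        · subst he; simp
        · have hne : (q1, q2) ≠ (j, q2) := by simpa [Prod.ext_iff] using he
          simp [hne, he]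
      simp only [hcond]
      rw [PySem.List.sum_map_ite_one_zero]
      have : List.countP (fun j => q.1 == j) (PySem.List.pyRange 0 (N : Int) 1) = 1 := by
        have hcnt : List.count q.1 (PySem.List.pyRange 0 (N : Int) 1) = 1 :=
          List.count_eq_one_of_mem (PySem.List.nodup_pyRange_one 0 (N : Int))
            (by rw [PySem.List.mem_pyRange_one]; omega)
        rw [← hcnt, List.count]
        exact List.countP_congr (by intro x hx; simp only [beq_iff_eq]; exact eq_comm)
      rw [this]
      simp [hqi]
    · have hcond : ∀ j : Int, j ∈ PySem.List.pyRange 0 (N : Int) 1 → (if q = (j, i) then (1 : Int) else 0) = 0 := by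
        intro j _
        have : q ≠ (j, i) := by
          intro hh; exact hqi (by rw [hh])
        simp [this]
      rw [List.map_congr_left hcond]
      simp [hqi]

-- nested state loop = loop over the flattened pair list
lemma pv_foldl_foldl_flatMap {σ : Type} (l : List Int) (h : Int → List Int)
    (f : σ → Int × Int → σ) (init : σ) :
    l.foldl (fun s i => (h i).foldl (fun s j => f s (i, j)) s) init
      = (l.flatMap (fun i => (h i).map (fun j => (i, j)))).foldl f init := by
  induction l generalizing init with
  | nil => rfl
  | cons x t ih =>
    simp only [List.foldl_cons, List.flatMap_cons, List.foldl_append, List.foldl_map]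
    exact ih _

lemma pv_mem_L (N : Nat) (p : Int × Int) (hp : p ∈ pvL N) :
    0 ≤ p.1 ∧ p.1 < p.2 ∧ p.2 < (N : Int) := by
  unfold pvL at hp
  simp only [List.mem_flatMap, List.mem_map] at hp
  obtain ⟨i, hi, j, hj, rfl⟩ := hp
  rw [PySem.List.mem_pyRange_one] at hi hj
  exact ⟨hi.1, by simpa using hj.1, by simpa using hj.2⟩

-- A's next_month loop: entries count the contributing pairs
lemma pv_nm_fold (N : Nat) (b : Int → Int → Bool) (L : List (Int × Int))
    (hL : ∀ p ∈ L, 0 ≤ p.1 ∧ p.1 < (N : Int) ∧ 0 ≤ p.2 ∧ p.2 < (N : Int)) :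
    ∀ nm : List Int, nm.length = N →
      (L.foldl (pvStepNM b) nm).length = N ∧
      ∀ k : Int, 0 ≤ k → k < (N : Int) →
        PySem.List.pyGetD (L.foldl (pvStepNM b) nm) k 0
          = PySem.List.pyGetD nm k 0 + (L.countP (pvQ b k) : Nat) := by
  induction L with
  | nil => intro nm h; simp [h]
  | cons q t ih =>
    intro nm hnm
    have hq := hL q (by simp)
    have hstep_len : (pvStepNM b nm q).length = N := by
      unfold pvStepNM pvInc
      split_ifs <;> simp [PySem.List.length_pySetD, hnm]
    obtain ⟨hlen, hent⟩ := ih (fun p hp => hL p (by simp [hp])) _ hstep_len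
    refine ⟨hlen, ?_⟩
    intro k h0 hkN
    rw [List.foldl_cons, hent k h0 hkN]
    have hstep : PySem.List.pyGetD (pvStepNM b nm q) k 0
        = PySem.List.pyGetD nm k 0 + if pvQ b k q = true then 1 else 0 := by
      unfold pvStepNM pvQ
      by_cases h1 : b q.1 q.2 = true
      · rw [if_pos h1, if_pos h1]
        unfold pvInc
        rw [pv_getD_setD nm q.1 k _ 0 hq.1 h0 (by omega)]
        by_cases he : q.1 = k <;> simp [he]
      · rw [if_neg h1, if_neg h1]
        by_cases h2 : b q.2 q.1 = true
        · rw [if_pos h2, if_pos h2]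
          unfold pvInc
          rw [pv_getD_setD nm q.2 k _ 0 hq.2.2.1 h0 (by omega)]
          by_cases he : q.2 = k <;> simp [he]
        · rw [if_neg h2, if_neg h2]; simp
    rw [hstep, List.countP_cons]
    by_cases hc : pvQ b k q = true <;> simp [hc] <;> push_cast <;> ring

lemma pv_B_excl (P : List (Int × Int)) (i j : Int) : ¬(pvB P i j = true ∧ pvB P j i = true) := by
  unfold pvB
  simp only [Bool.or_eq_true, Bool.and_eq_true, decide_eq_true_eq]
  omega

lemma pv_sum_map_ite_nat {α : Type} (p : α → Bool) (l : List α) :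
    (l.map (fun x => if p x = true then (1 : Nat) else 0)).sum = l.countP p := by
  induction l with
  | nil => rfl
  | cons a t ih =>
    by_cases h : p a = true <;> simp [h, ih, List.countP_cons] <;> omega

lemma pv_countP_eq_ite (r : Int → Bool) (l : List Int) (hnd : l.Nodup) (m : Int) :
    l.countP (fun j => j == m && r j) = if m ∈ l ∧ r m = true then 1 else 0 := by
  induction l with
  | nil => simp
  | cons a t ih =>
    rw [List.nodup_cons] at hnd
    rw [List.countP_cons, ih hnd.2]
    by_cases ham : a = m
    · subst ham
      by_cases hr : r a = true
      · simp [hr, hnd.1]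
      · simp [hr]
    · by_cases hm : m ∈ t <;> by_cases hr : r m = true <;>
        simp [ham, hm, hr, Ne.symm ham]

-- counting contributions over the triangle = counting beaten opponents in a row
lemma pv_countP_L (N : Nat) (b : Int → Int → Bool)
    (hb : ∀ i j, ¬(b i j = true ∧ b j i = true)) (k : Int) (h0 : 0 ≤ k) (hk : k < (N : Int)) :
    (pvL N).countP (pvQ b k) = (PySem.List.pyRange 0 (N : Int) 1).countP (fun j => j != k && b k j) := by
  unfold pvL
  rw [List.countP_flatMap]
  have hterm : ∀ i ∈ PySem.List.pyRange 0 (N : Int) 1,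
      (List.countP (pvQ b k) ∘ fun i => (PySem.List.pyRange (i + 1) (N : Int) 1).map (fun j => (i, j))) i
        = if i = k then (PySem.List.pyRange (k + 1) (N : Int) 1).countP (fun j => b k j)
          else if i < k ∧ b k i = true then 1 else 0 := by
    intro i hi
    rw [PySem.List.mem_pyRange_one] at hi
    simp only [Function.comp, List.countP_map]
    by_cases hik : i = k
    · subst hik
      rw [if_pos rfl]
      apply List.countP_congr
      intro j hj
      rw [PySem.List.mem_pyRange_one] at hj
      have hji : j ≠ i := by omega
      unfold pvQ
      simp only [Function.comp]
      by_cases h1 : b i j = true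
      · simp [h1]
      · by_cases h2 : b j i = true <;> simp [h1, h2, hji]
    · rw [if_neg hik]
      have hpred : ∀ j ∈ PySem.List.pyRange (i + 1) (N : Int) 1,
          ((pvQ b k ∘ fun j => (i, j)) j = true) ↔ ((fun j => j == k && (!(b i j) && b j i)) j = true) := by
        intro j _
        unfold pvQ
        simp only [Function.comp]
        by_cases h1 : b i j = true
        · simp [h1, hik]
        · by_cases h2 : b j i = true <;> simp [h1, h2]
      rw [List.countP_congr hpred,
          pv_countP_eq_ite (fun j => !(b i j) && b j i) _ (PySem.List.nodup_pyRange_one _ _) k]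
      by_cases hlt : i < k
      · have hmem : k ∈ PySem.List.pyRange (i + 1) (N : Int) 1 := by
          rw [PySem.List.mem_pyRange_one]; omega
        by_cases hbk : b k i = true
        · have hnb : b i k = false := by
            rcases Bool.eq_false_or_eq_true (b i k) with h | h
            · exact absurd ⟨h, hbk⟩ (hb i k)
            · exact h
          simp [hmem, hlt, hbk, hnb]
        · simp [hlt, hbk]
      · have hnmem : k ∉ PySem.List.pyRange (i + 1) (N : Int) 1 := by
          rw [PySem.List.mem_pyRange_one]; omega
        simp [hnmem, hlt]
  rw [List.map_congr_left hterm]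
  rw [PySem.List.pyRange_one_append 0 k (N : Int) (by omega) (by omega),
      PySem.List.pyRange_one_cons (show k < (N : Int) by omega)]
  rw [List.map_append, List.sum_append, List.map_cons, List.sum_cons,
      List.countP_append, List.countP_cons]
  have hpart1 : ((PySem.List.pyRange 0 k 1).map
      (fun i => if i = k then (PySem.List.pyRange (k + 1) (N : Int) 1).countP (fun j => b k j)
        else if i < k ∧ b k i = true then 1 else 0)).sum
      = (PySem.List.pyRange 0 k 1).countP (fun j => b k j) := by
    rw [List.map_congr_left (g := fun i => if (fun j => b k j) i = true then (1 : Nat) else 0) ?_]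
    · exact pv_sum_map_ite_nat _ _
    · intro i hi
      rw [PySem.List.mem_pyRange_one] at hi
      have : i ≠ k := by omega
      have : i < k := by omega
      simp_all
  have hpart3 : ((PySem.List.pyRange (k + 1) (N : Int) 1).map
      (fun i => if i = k then (PySem.List.pyRange (k + 1) (N : Int) 1).countP (fun j => b k j)
        else if i < k ∧ b k i = true then 1 else 0)).sum = 0 := by
    apply List.sum_eq_zero
    intro x hx
    rw [List.mem_map] at hx
    obtain ⟨i, hi, rfl⟩ := hx
    rw [PySem.List.mem_pyRange_one] at hi
    have h1 : i ≠ k := by omega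
    have h2 : ¬ (i < k) := by omega
    simp [h1, h2]
  rw [hpart1, hpart3, if_pos rfl]
  have hc1 : (PySem.List.pyRange 0 k 1).countP (fun j => j != k && b k j)
      = (PySem.List.pyRange 0 k 1).countP (fun j => b k j) := by
    apply List.countP_congr
    intro j hj
    rw [PySem.List.mem_pyRange_one] at hj
    have : j ≠ k := by omega
    simp [this]
  have hc2 : (PySem.List.pyRange (k + 1) (N : Int) 1).countP (fun j => j != k && b k j)
      = (PySem.List.pyRange (k + 1) (N : Int) 1).countP (fun j => b k j) := by
    apply List.countP_congr
    intro j hj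
    rw [PySem.List.mem_pyRange_one] at hj
    have : j ≠ k := by omega
    simp [this]
  rw [hc1, hc2]
  simp

-- A's if-chain is the canonical step
lemma pv_step_eq (c : Int → Int → Int) (s : Int → Int) (nm : List Int) (i j : Int) :
    (if c i j > c j i then pvInc nm i
     else if c i j < c j i then pvInc nm j
     else if s i > s j then pvInc nm i
     else if s i < s j then pvInc nm j
     else nm)
      = pvStepNM (fun a b => decide (c a b > c b a) || (decide (c a b = c b a) && decide (s a > s b))) nm (i, j) := by
  unfold pvStepNM
  rcases lt_trichotomy (c i j) (c j i) with h | h | h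
  · simp [h, not_lt.mpr (le_of_lt h), h.ne]
  · rcases lt_trichotomy (s i) (s j) with h2 | h2 | h2
    · simp [h, h2, not_lt.mpr (le_of_lt h2)]
    · simp [h, h2]
    · simp [h, h2, not_lt.mpr (le_of_lt h2)]
  · simp [h, not_lt.mpr (le_of_lt h), h.ne']

lemma pv_solution_eq (friends gifts : List String) (h : friends ≠ []) :
    solution friends gifts = pvRes friends gifts := by
  have hN : 0 < friends.length := List.length_pos_iff.mpr h
  have hPb := pv_parse_bounds friends gifts h
  have hZ : solA_gift0 friends
      = List.replicate friends.length (List.replicate friends.length (0 : Int)) := by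
    unfold solA_gift0
    simp [List.map_const', PySem.List.length_pyRange_one]
  have hgift : solA_gift friends gifts = (pvP friends gifts).foldl pvUpd
      (List.replicate friends.length (List.replicate friends.length 0)) := by
    unfold solA_gift pvP
    rw [hZ, List.foldl_map]
    rfl
  obtain ⟨hGlen, hGrows, hGsum, hGent⟩ :=
    pv_matrix_fold friends.length (pvP friends gifts) hPb
      (List.replicate friends.length (List.replicate friends.length 0))
      (by simp)
      (by intro r hr; rw [List.eq_of_mem_replicate hr]; simp)
  have hrepl : ∀ i : Int, 0 ≤ i → i < (friends.length : Int) →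
      PySem.List.pyGetD (List.replicate friends.length (0 : Int)) i 0 = 0 := by
    intro i h0 hi
    rw [PySem.List.pyGetD_eq_getElem _ _ h0 (by simpa using hi)]
    simp
  have hrow0 : ∀ i : Int, 0 ≤ i → i < (friends.length : Int) →
      PySem.List.pyGetD (List.replicate friends.length (List.replicate friends.length (0 : Int))) i []
        = List.replicate friends.length 0 := by
    intro i h0 hi
    rw [PySem.List.pyGetD_eq_getElem _ _ h0 (by simpa using hi)]
    simp
  have hent : ∀ i j : Int, 0 ≤ i → i < (friends.length : Int) → 0 ≤ j → j < (friends.length : Int) →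
      PySem.List.pyGetD (PySem.List.pyGetD (solA_gift friends gifts) i []) j 0
        = ((pvP friends gifts).count (i, j) : Int) := by
    intro i j hi0 hi hj0 hj
    rw [hgift, hGent i j hi0 hi hj0 hj, hrow0 i hi0 hi, hrepl j hj0 hj]
    simp
  have hsum : ∀ i : Int, 0 ≤ i → i < (friends.length : Int) →
      (PySem.List.pyGetD (solA_gift friends gifts) i []).sum
        = ((pvP friends gifts).countP (fun p => p.1 == i) : Int) := by
    intro i hi0 hi
    rw [hgift, hGsum i hi0 hi, hrow0 i hi0 hi]
    simp
  have hgiven : solA_given friends gifts = (PySem.List.pyRange 0 (friends.length : Int) 1).map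
      (fun i => ((pvP friends gifts).countP (fun p => p.1 == i) : Int)) := by
    unfold solA_given
    simp only [PySem.List.len_eq]
    rw [PySem.List.foldl_append_singleton_eq_map]
    simp only [List.nil_append]
    apply List.map_congr_left
    intro i hi
    rw [PySem.List.mem_pyRange_one] at hi
    rw [PySem.List.foldl_add (PySem.List.pyGetD (solA_gift friends gifts) i []) (fun x => x) 0]
    simp only [List.map_id']
    rw [zero_add, hsum i hi.1 hi.2]
  have htaken : solA_taken friends gifts = (PySem.List.pyRange 0 (friends.length : Int) 1).map
      (fun i => ((pvP friends gifts).countP (fun p => p.2 == i) : Int)) := by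
    unfold solA_taken
    simp only [PySem.List.len_eq]
    rw [PySem.List.foldl_append_singleton_eq_map]
    simp only [List.nil_append]
    apply List.map_congr_left
    intro i hi
    rw [PySem.List.mem_pyRange_one] at hi
    rw [PySem.List.foldl_add (PySem.List.pyRange 0 (friends.length : Int) 1)
      (fun j => PySem.List.pyGetD (PySem.List.pyGetD (solA_gift friends gifts) j []) i 0) 0,
      zero_add]
    rw [List.map_congr_left (g := fun j : Int => ((pvP friends gifts).count (j, i) : Int))
      (fun j hj => by
        rw [PySem.List.mem_pyRange_one] at hj
        exact hent j i hj.1 hj.2 hi.1 hi.2)]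
    exact pv_sum_count_snd friends.length (pvP friends gifts)
      (fun p hp => ⟨(hPb p hp).1, (hPb p hp).2.1⟩) i
  have hlenG : PySem.List.len (solA_given friends gifts) = (friends.length : Int) := by
    rw [hgiven]
    simp [PySem.List.len_eq, PySem.List.length_pyRange_one]
  have hscoreA : solA_score friends gifts = (PySem.List.pyRange 0 (friends.length : Int) 1).map
      (fun i => pvS (pvP friends gifts) i) := by
    unfold solA_score
    rw [hlenG, PySem.List.foldl_append_singleton_eq_map]
    simp only [List.nil_append]
    apply List.map_congr_left
    intro i hi
    rw [PySem.List.mem_pyRange_one] at hi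
    rw [hgiven, htaken,
        PySem.List.pyGetD_map_pyRange_of_nonneg _ _ _ _ hi.1 hi.2,
        PySem.List.pyGetD_map_pyRange_of_nonneg _ _ _ _ hi.1 hi.2]
    unfold pvS
    push_cast
    ring
  have hsc : ∀ a : Int, 0 ≤ a → a < (friends.length : Int) →
      PySem.List.pyGetD (solA_score friends gifts) a 0 = pvS (pvP friends gifts) a := by
    intro a h0 ha
    rw [hscoreA, PySem.List.pyGetD_map_pyRange_of_nonneg _ _ _ _ h0 ha]
  have hnext1 : solA_next friends gifts
      = (pvL friends.length).foldl (fun nm p =>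
          if PySem.List.pyGetD (PySem.List.pyGetD (solA_gift friends gifts) p.1 []) p.2 0
              > PySem.List.pyGetD (PySem.List.pyGetD (solA_gift friends gifts) p.2 []) p.1 0 then
            PySem.List.pySetD nm p.1 (PySem.List.pyGetD nm p.1 0 + 1)
          else if PySem.List.pyGetD (PySem.List.pyGetD (solA_gift friends gifts) p.1 []) p.2 0
              < PySem.List.pyGetD (PySem.List.pyGetD (solA_gift friends gifts) p.2 []) p.1 0 then
            PySem.List.pySetD nm p.2 (PySem.List.pyGetD nm p.2 0 + 1)
          else if PySem.List.pyGetD (solA_score friends gifts) p.1 0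
              > PySem.List.pyGetD (solA_score friends gifts) p.2 0 then
            PySem.List.pySetD nm p.1 (PySem.List.pyGetD nm p.1 0 + 1)
          else if PySem.List.pyGetD (solA_score friends gifts) p.1 0
              < PySem.List.pyGetD (solA_score friends gifts) p.2 0 then
            PySem.List.pySetD nm p.2 (PySem.List.pyGetD nm p.2 0 + 1)
          else nm)
        (List.replicate friends.length 0) := by
    unfold solA_next pvL
    simp only [PySem.List.len_eq]
    exact pv_foldl_foldl_flatMap (PySem.List.pyRange 0 (friends.length : Int) 1)
      (fun i => PySem.List.pyRange (i + 1) (friends.length : Int) 1)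
      (fun nm p =>
          if PySem.List.pyGetD (PySem.List.pyGetD (solA_gift friends gifts) p.1 []) p.2 0
              > PySem.List.pyGetD (PySem.List.pyGetD (solA_gift friends gifts) p.2 []) p.1 0 then
            PySem.List.pySetD nm p.1 (PySem.List.pyGetD nm p.1 0 + 1)
          else if PySem.List.pyGetD (PySem.List.pyGetD (solA_gift friends gifts) p.1 []) p.2 0
              < PySem.List.pyGetD (PySem.List.pyGetD (solA_gift friends gifts) p.2 []) p.1 0 then
            PySem.List.pySetD nm p.2 (PySem.List.pyGetD nm p.2 0 + 1)
          else if PySem.List.pyGetD (solA_score friends gifts) p.1 0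
              > PySem.List.pyGetD (solA_score friends gifts) p.2 0 then
            PySem.List.pySetD nm p.1 (PySem.List.pyGetD nm p.1 0 + 1)
          else if PySem.List.pyGetD (solA_score friends gifts) p.1 0
              < PySem.List.pyGetD (solA_score friends gifts) p.2 0 then
            PySem.List.pySetD nm p.2 (PySem.List.pyGetD nm p.2 0 + 1)
          else nm)
      (List.replicate friends.length 0)
  have hnext2 : solA_next friends gifts
      = (pvL friends.length).foldl (pvStepNM (pvB (pvP friends gifts))) (List.replicate friends.length 0) := by
    rw [hnext1]
    apply PySem.List.foldl_congr_mem
    intro nm p hp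
    obtain ⟨hp1, hp12, hp2N⟩ := pv_mem_L friends.length p hp
    have e1 := pv_step_eq
      (fun a b => PySem.List.pyGetD (PySem.List.pyGetD (solA_gift friends gifts) a []) b 0)
      (fun a => PySem.List.pyGetD (solA_score friends gifts) a 0) nm p.1 p.2
    refine Eq.trans e1 ?_
    refine pvStepNM_congr _ _ nm p ?_ ?_
    · show (decide (PySem.List.pyGetD (PySem.List.pyGetD (solA_gift friends gifts) p.1 []) p.2 0
          > PySem.List.pyGetD (PySem.List.pyGetD (solA_gift friends gifts) p.2 []) p.1 0) ||
        (decide (PySem.List.pyGetD (PySem.List.pyGetD (solA_gift friends gifts) p.1 []) p.2 0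
          = PySem.List.pyGetD (PySem.List.pyGetD (solA_gift friends gifts) p.2 []) p.1 0) &&
         decide (PySem.List.pyGetD (solA_score friends gifts) p.1 0
          > PySem.List.pyGetD (solA_score friends gifts) p.2 0)))
        = pvB (pvP friends gifts) p.1 p.2
      rw [hent p.1 p.2 hp1 (by omega) (by omega) hp2N,
          hent p.2 p.1 (by omega) hp2N hp1 (by omega),
          hsc p.1 hp1 (by omega), hsc p.2 (by omega) hp2N]
      rfl
    · show (decide (PySem.List.pyGetD (PySem.List.pyGetD (solA_gift friends gifts) p.2 []) p.1 0
          > PySem.List.pyGetD (PySem.List.pyGetD (solA_gift friends gifts) p.1 []) p.2 0) ||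
        (decide (PySem.List.pyGetD (PySem.List.pyGetD (solA_gift friends gifts) p.2 []) p.1 0
          = PySem.List.pyGetD (PySem.List.pyGetD (solA_gift friends gifts) p.1 []) p.2 0) &&
         decide (PySem.List.pyGetD (solA_score friends gifts) p.2 0
          > PySem.List.pyGetD (solA_score friends gifts) p.1 0)))
        = pvB (pvP friends gifts) p.2 p.1
      rw [hent p.1 p.2 hp1 (by omega) (by omega) hp2N,
          hent p.2 p.1 (by omega) hp2N hp1 (by omega),
          hsc p.1 hp1 (by omega), hsc p.2 (by omega) hp2N]
      rfl
  obtain ⟨hnmlen, hnment⟩ := pv_nm_fold friends.length (pvB (pvP friends gifts)) (pvL friends.length)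
    (fun p hp => by
      obtain ⟨a, b, c⟩ := pv_mem_L friends.length p hp
      exact ⟨a, by omega, by omega, c⟩)
    (List.replicate friends.length 0) (by simp)
  have hnext : solA_next friends gifts = (PySem.List.pyRange 0 (friends.length : Int) 1).map
      (fun i => pvWins (pvP friends gifts) friends.length i) := by
    rw [hnext2]
    apply List.ext_getElem
    · rw [hnmlen]
      simp [PySem.List.length_pyRange_one]
    · intro k hk1 hk2
      have hkN : k < friends.length := by rw [hnmlen] at hk1; exact hk1
      rw [List.getElem_map, PySem.List.getElem_pyRange_one]
      have hLk := hnment (k : Int) (by positivity) (by exact_mod_cast hkN)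
      rw [hrepl (k : Int) (by positivity) (by exact_mod_cast hkN), zero_add,
          pv_countP_L friends.length (pvB (pvP friends gifts)) (pv_B_excl (pvP friends gifts))
            (k : Int) (by positivity) (by exact_mod_cast hkN)] at hLk
      rw [PySem.List.pyGetD_eq_getElem _ 0 (by positivity) (by rw [hnmlen]; simpa using hkN)] at hLk
      simp only [Int.toNat_natCast] at hLk
      rw [hLk]
      unfold pvWins
      norm_num
  unfold solution pvRes
  rw [hnext]

-- ======== B-side lemmas ========

-- the unordered key of a pair, and the canonical per-key correction amounts
def pvQKey (k j : Int) : Int × Int := if k < j then (k, j) else (j, k)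

def pvAdj (s : Int → Int) (k w l : Int) : Int :=
  if s w < s l then (if k = w then 1 else if k = l then -1 else 0)
  else if s w = s l then (if k = w then 1 else 0) else 0

def pvDeltaC (s : Int → Int) (k : Int) (pd : (Int × Int) × Int) : Int :=
  if pd.2 > 0 then pvAdj s k pd.1.1 pd.1.2
  else if pd.2 < 0 then pvAdj s k pd.1.2 pd.1.1 else 0

def pvDelta (P : List (Int × Int)) (k : Int) (q : Int × Int) : Int :=
  pvDeltaC (pvS P) k (q, ((P.count q : Nat) : Int) - ((P.count (q.2, q.1) : Nat) : Int))

def pvNetStep (d : PySem.Dict (Int × Int) Int) (p : Int × Int) : PySem.Dict (Int × Int) Int :=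
  if p.1 < p.2 then d.insert (p.1, p.2) (d.getD (p.1, p.2) 0 + 1)
  else if p.2 < p.1 then d.insert (p.2, p.1) (d.getD (p.2, p.1) 0 - 1)
  else d

def pvCAdj (s : Int → Int) (wins : List Int) (w l : Int) : List Int :=
  if s w < s l then
    PySem.List.pySetD (PySem.List.pySetD wins w (PySem.List.pyGetD wins w 0 + 1)) l
      (PySem.List.pyGetD (PySem.List.pySetD wins w (PySem.List.pyGetD wins w 0 + 1)) l 0 - 1)
  else if s w = s l then PySem.List.pySetD wins w (PySem.List.pyGetD wins w 0 + 1)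
  else wins

def pvWStep (s : Int → Int) (wins : List Int) (pd : (Int × Int) × Int) : List Int :=
  if pd.2 > 0 then pvCAdj s wins pd.1.1 pd.1.2
  else if pd.2 < 0 then pvCAdj s wins pd.1.2 pd.1.1
  else wins

-- B's score accumulation: +1 at the giver, −1 at the receiver
lemma pv_score_fold (N : Nat) (Q : List (Int × Int))
    (hQ : ∀ p ∈ Q, 0 ≤ p.1 ∧ p.1 < (N : Int) ∧ 0 ≤ p.2 ∧ p.2 < (N : Int)) :
    ∀ v : List Int, v.length = N →
      (Q.foldl (fun v p =>
        PySem.List.pySetD (PySem.List.pySetD v p.1 (PySem.List.pyGetD v p.1 0 + 1)) p.2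
          (PySem.List.pyGetD (PySem.List.pySetD v p.1 (PySem.List.pyGetD v p.1 0 + 1)) p.2 0 - 1)) v).length = N ∧
      ∀ i : Int, 0 ≤ i → i < (N : Int) →
        PySem.List.pyGetD (Q.foldl (fun v p =>
          PySem.List.pySetD (PySem.List.pySetD v p.1 (PySem.List.pyGetD v p.1 0 + 1)) p.2
            (PySem.List.pyGetD (PySem.List.pySetD v p.1 (PySem.List.pyGetD v p.1 0 + 1)) p.2 0 - 1)) v) i 0
          = PySem.List.pyGetD v i 0
            + ((Q.countP (fun p => p.1 == i) : Nat) : Int) - ((Q.countP (fun p => p.2 == i) : Nat) : Int) := by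
  induction Q with
  | nil => intro v hv; simp [hv]
  | cons q t ih =>
    intro v hv
    simp only [List.foldl_cons]
    have hq := hQ q (by simp)
    have hv1 : (PySem.List.pySetD v q.1 (PySem.List.pyGetD v q.1 0 + 1)).length = N := by
      rw [PySem.List.length_pySetD]; exact hv
    have hv2 : (PySem.List.pySetD (PySem.List.pySetD v q.1 (PySem.List.pyGetD v q.1 0 + 1)) q.2
        (PySem.List.pyGetD (PySem.List.pySetD v q.1 (PySem.List.pyGetD v q.1 0 + 1)) q.2 0 - 1)).length = N := by
      rw [PySem.List.length_pySetD]; exact hv1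
    obtain ⟨hlen, hent⟩ := ih (fun p hp => hQ p (by simp [hp])) _ hv2
    refine ⟨hlen, ?_⟩
    intro i h0 hiN
    rw [hent i h0 hiN]
    have hstep : PySem.List.pyGetD (PySem.List.pySetD (PySem.List.pySetD v q.1 (PySem.List.pyGetD v q.1 0 + 1)) q.2
        (PySem.List.pyGetD (PySem.List.pySetD v q.1 (PySem.List.pyGetD v q.1 0 + 1)) q.2 0 - 1)) i 0
        = PySem.List.pyGetD v i 0 + (if q.1 = i then 1 else 0) - (if q.2 = i then 1 else 0) := by
      rw [pv_getD_setD _ q.2 i _ 0 hq.2.2.1 h0 (by rw [hv1]; omega),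
          pv_getD_setD v q.1 i _ 0 hq.1 h0 (by omega),
          pv_getD_setD v q.1 q.2 _ 0 hq.1 hq.2.2.1 (by omega)]
      by_cases h1 : q.1 = i <;> by_cases h2 : q.2 = i <;>
        by_cases h3 : q.1 = q.2 <;> simp [h1, h2, h3] <;> omega
    rw [hstep, List.countP_cons, List.countP_cons]
    by_cases h1 : q.1 = i <;> by_cases h2 : q.2 = i <;> simp [h1, h2] <;> push_cast <;> ring

-- the net dictionary's value at a sorted key is the signed gift difference
lemma pv_net_getD (Q : List (Int × Int)) (i j : Int) (hij : i < j) :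
    ∀ d : PySem.Dict (Int × Int) Int,
      (Q.foldl pvNetStep d).getD (i, j) 0
        = d.getD (i, j) 0 + ((Q.count (i, j) : Nat) : Int) - ((Q.count (j, i) : Nat) : Int) := by
  induction Q with
  | nil => intro d; simp
  | cons q t ih =>
    intro d
    simp only [List.foldl_cons]
    rw [ih (pvNetStep d q)]
    have hcnt1 : ((List.count (i, j) (q :: t) : Nat) : Int)
        = ((List.count (i, j) t : Nat) : Int) + (if q = (i, j) then (1 : Int) else 0) := by
      rw [List.count_cons]; by_cases hq : q = (i, j) <;> simp [hq]
    have hcnt2 : ((List.count (j, i) (q :: t) : Nat) : Int)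
        = ((List.count (j, i) t : Nat) : Int) + (if q = (j, i) then (1 : Int) else 0) := by
      rw [List.count_cons]; by_cases hq : q = (j, i) <;> simp [hq]
    rw [hcnt1, hcnt2]
    unfold pvNetStep
    rcases lt_trichotomy q.1 q.2 with h | h | h
    · rw [if_pos h, PySem.Dict.getD_insert]
      by_cases he : (i, j) = (q.1, q.2)
      · have hq : q = (i, j) := by rw [Prod.ext_iff] at he ⊢; exact ⟨he.1.symm, he.2.symm⟩
        have hne : q ≠ (j, i) := by
          rw [hq]; intro hh; rw [Prod.ext_iff] at hh; simp only at hh; omega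
        rw [if_pos he, if_pos hq, if_neg hne, ← he]
        ring
      · have hq1 : q ≠ (i, j) := by intro hh; exact he (by rw [hh])
        have hq2 : q ≠ (j, i) := by intro hh; rw [hh] at h; simp only at h; omega
        rw [if_neg he, if_neg hq1, if_neg hq2]
        ring
    · rw [if_neg (by omega), if_neg (by omega)]
      have hq1 : q ≠ (i, j) := by intro hh; rw [hh] at h; simp only at h; omega
      have hq2 : q ≠ (j, i) := by intro hh; rw [hh] at h; simp only at h; omega
      rw [if_neg hq1, if_neg hq2]
      ring
    · rw [if_neg (by omega), if_pos h, PySem.Dict.getD_insert]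
      by_cases he : (i, j) = (q.2, q.1)
      · have hq : q = (j, i) := by rw [Prod.ext_iff] at he ⊢; exact ⟨he.2.symm, he.1.symm⟩
        have hne : q ≠ (i, j) := by
          rw [hq]; intro hh; rw [Prod.ext_iff] at hh; simp only at hh; omega
        rw [if_pos he, if_neg hne, if_pos hq, ← he]
        ring
      · have hq2 : q ≠ (j, i) := by intro hh; exact he (by rw [hh])
        have hq1 : q ≠ (i, j) := by intro hh; rw [hh] at h; simp only at h; omega
        rw [if_neg he, if_neg hq1, if_neg hq2]
        ring

-- keys of the net dictionary: nodup, sorted, in range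
lemma pv_net_keys (N : Nat) (Q : List (Int × Int))
    (hQ : ∀ p ∈ Q, 0 ≤ p.1 ∧ p.1 < (N : Int) ∧ 0 ≤ p.2 ∧ p.2 < (N : Int)) :
    ∀ d : PySem.Dict (Int × Int) Int, d.keys.Nodup →
      (∀ q ∈ d.keys, 0 ≤ q.1 ∧ q.1 < q.2 ∧ q.2 < (N : Int)) →
      (Q.foldl pvNetStep d).keys.Nodup ∧
      ∀ q ∈ (Q.foldl pvNetStep d).keys, 0 ≤ q.1 ∧ q.1 < q.2 ∧ q.2 < (N : Int) := by
  induction Q with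
  | nil => intro d h1 h2; exact ⟨h1, h2⟩
  | cons p t ih =>
    intro d h1 h2
    simp only [List.foldl_cons]
    have hp := hQ p (by simp)
    refine ih (fun x hx => hQ x (by simp [hx])) _ ?_ ?_
    · unfold pvNetStep
      split_ifs <;> first | exact PySem.Dict.nodup_keys_insert d _ _ h1 | exact h1
    · intro q hq
      unfold pvNetStep at hq
      split_ifs at hq with hlt1 hlt2
      · rcases (PySem.Dict.mem_keys_insert _ _ _ _).mp hq with rfl | hmem
        · exact ⟨hp.1, by omega, hp.2.2.2⟩
        · exact h2 q hmem
      · rcases (PySem.Dict.mem_keys_insert _ _ _ _).mp hq with rfl | hmem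
        · exact ⟨hp.2.2.1, by omega, hp.2.1⟩
        · exact h2 q hmem
      · exact h2 q hq

-- key membership in the net dictionary
lemma pv_net_mem (Q : List (Int × Int)) (i j : Int) (hij : i < j) :
    ∀ d : PySem.Dict (Int × Int) Int,
      ((i, j) ∈ (Q.foldl pvNetStep d).keys ↔ (i, j) ∈ d.keys ∨ (i, j) ∈ Q ∨ (j, i) ∈ Q) := by
  induction Q with
  | nil => intro d; simp
  | cons p t ih =>
    intro d
    simp only [List.foldl_cons, List.mem_cons]
    rw [ih (pvNetStep d p)]
    unfold pvNetStep
    rcases lt_trichotomy p.1 p.2 with h | h | h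
    · rw [if_pos h, PySem.Dict.mem_keys_insert, Prod.mk.eta]
      have hji : (j, i) ≠ p := by intro hh; rw [← hh] at h; simp only at h; omega
      tauto
    · rw [if_neg (by omega), if_neg (by omega)]
      have h1 : (i, j) ≠ p := by intro hh; rw [← hh] at h; simp only at h; omega
      have h2 : (j, i) ≠ p := by intro hh; rw [← hh] at h; simp only at h; omega
      tauto
    · rw [if_neg (by omega), if_pos h, PySem.Dict.mem_keys_insert]
      have hswap : ((i, j) = (p.2, p.1)) ↔ (j, i) = p := by
        rw [Prod.ext_iff, Prod.ext_iff]
        simp only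
        omega
      have h1 : (i, j) ≠ p := by intro hh; rw [← hh] at h; simp only at h; omega
      rw [hswap]
      tauto

-- effect of one correction step on one entry of wins
lemma pv_cadj_len (s : Int → Int) (wins : List Int) (w l : Int) :
    (pvCAdj s wins w l).length = wins.length := by
  unfold pvCAdj
  split_ifs <;> simp [PySem.List.length_pySetD]

lemma pv_cadj_entry (s : Int → Int) (wins : List Int) (w l k : Int) (hwl : w ≠ l)
    (hw : 0 ≤ w) (hl : 0 ≤ l) (hwN : w < (wins.length : Int)) (hlN : l < (wins.length : Int))
    (hk : 0 ≤ k) (hkN : k < (wins.length : Int)) :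
    PySem.List.pyGetD (pvCAdj s wins w l) k 0 = PySem.List.pyGetD wins k 0 + pvAdj s k w l := by
  have hlen1 : (PySem.List.pySetD wins w (PySem.List.pyGetD wins w 0 + 1)).length = wins.length := by
    rw [PySem.List.length_pySetD]
  unfold pvCAdj
  split_ifs with h1 h2
  · have ha : pvAdj s k w l = if k = w then 1 else if k = l then (-1) else 0 := by
      unfold pvAdj; rw [if_pos h1]
    rw [ha, pv_getD_setD _ l k _ 0 hl hk (by rw [hlen1]; omega),
        pv_getD_setD wins w k _ 0 hw hk hkN,
        pv_getD_setD wins w l _ 0 hw hl hlN]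
    by_cases hlk : l = k
    · rw [hlk] at hwl ⊢
      rw [if_pos rfl, if_neg hwl, if_neg (Ne.symm hwl), if_pos rfl]
      ring
    · by_cases hwk : w = k
      · rw [hwk] at hwl ⊢
        simp [hlk]
      · rw [if_neg hlk, if_neg hwk, if_neg (fun h : k = w => hwk h.symm),
            if_neg (fun h : k = l => hlk h.symm)]
        ring
  · have ha : pvAdj s k w l = if k = w then 1 else 0 := by
      unfold pvAdj; rw [if_neg h1, if_pos h2]
    rw [ha, pv_getD_setD wins w k _ 0 hw hk hkN]
    by_cases hwk : w = k
    · rw [hwk, if_pos rfl, if_pos rfl]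
    · rw [if_neg hwk, if_neg (fun h : k = w => hwk h.symm)]
      ring
  · have ha : pvAdj s k w l = 0 := by
      unfold pvAdj; rw [if_neg h1, if_neg h2]
    rw [ha]
    ring

-- the correction loop adds the canonical per-item delta to each entry
lemma pv_wins_fold (N : Nat) (s : Int → Int) (L : List ((Int × Int) × Int))
    (hL : ∀ pd ∈ L, 0 ≤ pd.1.1 ∧ pd.1.1 < pd.1.2 ∧ pd.1.2 < (N : Int)) :
    ∀ wins : List Int, wins.length = N →
      (L.foldl (pvWStep s) wins).length = N ∧
      ∀ k : Int, 0 ≤ k → k < (N : Int) →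
        PySem.List.pyGetD (L.foldl (pvWStep s) wins) k 0
          = PySem.List.pyGetD wins k 0 + (L.map (pvDeltaC s k)).sum := by
  induction L with
  | nil => intro wins h; simp [h]
  | cons pd t ih =>
    intro wins hw
    simp only [List.foldl_cons]
    obtain ⟨hb1, hb2, hb3⟩ := hL pd (by simp)
    have hslen : (pvWStep s wins pd).length = N := by
      unfold pvWStep
      split_ifs <;> simp [pv_cadj_len, hw]
    obtain ⟨hlen, hent⟩ := ih (fun x hx => hL x (by simp [hx])) _ hslen
    refine ⟨hlen, ?_⟩
    intro k h0 hkN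
    rw [hent k h0 hkN]
    have hstep : PySem.List.pyGetD (pvWStep s wins pd) k 0
        = PySem.List.pyGetD wins k 0 + pvDeltaC s k pd := by
      unfold pvWStep pvDeltaC
      split_ifs
      · exact pv_cadj_entry s wins pd.1.1 pd.1.2 k (by omega) (by omega) (by omega)
          (by rw [hw]; omega) (by rw [hw]; omega) h0 (by rw [hw]; omega)
      · exact pv_cadj_entry s wins pd.1.2 pd.1.1 k (by omega) (by omega) (by omega)
          (by rw [hw]; omega) (by rw [hw]; omega) h0 (by rw [hw]; omega)
      · simp
    rw [hstep, List.map_cons, List.sum_cons]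
    ring

-- summing an indicator of 'j = m' over a nodup list
lemma pv_sum_ite_eq_mem (l : List Int) (hnd : l.Nodup) (m : Int) (c : Int) :
    (l.map (fun j => if j = m then c else 0)).sum = if m ∈ l then c else 0 := by
  induction l with
  | nil => simp
  | cons a t ih =>
    rw [List.nodup_cons] at hnd
    simp only [List.map_cons, List.sum_cons, ih hnd.2, List.mem_cons]
    by_cases ham : a = m
    · subst ham; simp [hnd.1]
    · by_cases hm : m ∈ t <;> simp [ham, hm, Ne.symm ham]

-- when the unordered key of (k, j) is a given sorted pair
lemma pv_qkey_eq_iff (k j : Int) (p : Int × Int) (hp : p.1 < p.2) :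
    pvQKey k j = p ↔ ((k = p.1 ∧ j = p.2) ∨ (k = p.2 ∧ j = p.1)) := by
  unfold pvQKey
  rcases lt_trichotomy k j with h | h | h
  · rw [if_pos h, Prod.ext_iff]
    simp only
    constructor
    · rintro ⟨h1, h2⟩; exact Or.inl ⟨h1, h2⟩
    · rintro (⟨h1, h2⟩ | ⟨h1, h2⟩)
      · exact ⟨h1, h2⟩
      · exfalso; omega
  · rw [if_neg (by omega), Prod.ext_iff]
    simp only
    constructor
    · rintro ⟨h1, h2⟩; exfalso; omega
    · rintro (⟨h1, h2⟩ | ⟨h1, h2⟩) <;> (exfalso; omega)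
  · rw [if_neg (by omega), Prod.ext_iff]
    simp only
    constructor
    · rintro ⟨h1, h2⟩; exact Or.inr ⟨h2, h1⟩
    · rintro (⟨h1, h2⟩ | ⟨h1, h2⟩)
      · exfalso; omega
      · exact ⟨h2, h1⟩

-- summing 'if qkey = p then c else 0' over the whole range hits p at most once
lemma pv_sum_qkey_eq (N : Nat) (k : Int) (hk0 : 0 ≤ k) (hkN : k < (N : Int))
    (p : Int × Int) (hp : 0 ≤ p.1 ∧ p.1 < p.2 ∧ p.2 < (N : Int)) (c : Int) :
    ((PySem.List.pyRange 0 (N : Int) 1).map (fun j => if pvQKey k j = p then c else 0)).sum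
      = if k = p.1 ∨ k = p.2 then c else 0 := by
  obtain ⟨hp1, hp2, hp3⟩ := hp
  by_cases h1 : k = p.1
  · have hcong : ∀ j ∈ PySem.List.pyRange 0 (N : Int) 1,
        (if pvQKey k j = p then c else 0) = (if j = p.2 then c else 0) := by
      intro j _
      by_cases hj : j = p.2
      · rw [if_pos ((pv_qkey_eq_iff k j p hp2).mpr (Or.inl ⟨h1, hj⟩)), if_pos hj]
      · rw [if_neg (fun hq => by
            rcases (pv_qkey_eq_iff k j p hp2).mp hq with ⟨ha, hb⟩ | ⟨ha, hb⟩ <;> omega),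
          if_neg hj]
    rw [List.map_congr_left hcong,
        pv_sum_ite_eq_mem _ (PySem.List.nodup_pyRange_one _ _) p.2 c]
    have hm : p.2 ∈ PySem.List.pyRange 0 (N : Int) 1 := by
      rw [PySem.List.mem_pyRange_one]; omega
    rw [if_pos hm, if_pos (Or.inl h1)]
  · by_cases h2 : k = p.2
    · have hcong : ∀ j ∈ PySem.List.pyRange 0 (N : Int) 1,
          (if pvQKey k j = p then c else 0) = (if j = p.1 then c else 0) := by
        intro j _
        by_cases hj : j = p.1
        · rw [if_pos ((pv_qkey_eq_iff k j p hp2).mpr (Or.inr ⟨h2, hj⟩)), if_pos hj]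
        · rw [if_neg (fun hq => by
              rcases (pv_qkey_eq_iff k j p hp2).mp hq with ⟨ha, hb⟩ | ⟨ha, hb⟩ <;> omega),
            if_neg hj]
      rw [List.map_congr_left hcong,
          pv_sum_ite_eq_mem _ (PySem.List.nodup_pyRange_one _ _) p.1 c]
      have hm : p.1 ∈ PySem.List.pyRange 0 (N : Int) 1 := by
        rw [PySem.List.mem_pyRange_one]; omega
      rw [if_pos hm, if_pos (Or.inr h2)]
    · have hcong : ∀ j ∈ PySem.List.pyRange 0 (N : Int) 1,
          (if pvQKey k j = p then c else 0) = 0 := by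
        intro j _
        rw [if_neg (fun hq => by
          rcases (pv_qkey_eq_iff k j p hp2).mp hq with ⟨ha, hb⟩ | ⟨ha, hb⟩ <;> omega)]
      rw [List.map_congr_left hcong]
      have : ¬ (k = p.1 ∨ k = p.2) := by tauto
      rw [if_neg this]
      simp

lemma pv_sum_map_sub {α : Type} (f g : α → Int) (l : List α) :
    (l.map (fun x => f x - g x)).sum = (l.map f).sum - (l.map g).sum := by
  induction l with
  | nil => simp
  | cons a t ih => simp [ih]; ring

-- the delta vanishes unless k is an endpoint of the key
lemma pv_delta_zero (P : List (Int × Int)) (k : Int) (q : Int × Int)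
    (h1 : k ≠ q.1) (h2 : k ≠ q.2) : pvDelta P k q = 0 := by
  unfold pvDelta pvDeltaC pvAdj
  split_ifs <;> simp_all

-- reindexing: the sum of deltas over the key list = the sum over the range of qkey lookups
lemma pv_sum_reindex (N : Nat) (P : List (Int × Int)) (k : Int) (hk0 : 0 ≤ k) (hkN : k < (N : Int))
    (K : List (Int × Int)) (hnd : K.Nodup)
    (hG : ∀ q ∈ K, 0 ≤ q.1 ∧ q.1 < q.2 ∧ q.2 < (N : Int)) :
    (K.map (pvDelta P k)).sum
      = ((PySem.List.pyRange 0 (N : Int) 1).map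
          (fun j => if pvQKey k j ∈ K then pvDelta P k (pvQKey k j) else 0)).sum := by
  induction K with
  | nil => simp
  | cons p t ih =>
    rw [List.nodup_cons] at hnd
    have hp := hG p (by simp)
    have hsplit : ∀ j ∈ PySem.List.pyRange 0 (N : Int) 1,
        (if pvQKey k j ∈ p :: t then pvDelta P k (pvQKey k j) else 0)
          = (if pvQKey k j = p then pvDelta P k p else 0)
            + (if pvQKey k j ∈ t then pvDelta P k (pvQKey k j) else 0) := by
      intro j _
      by_cases he : pvQKey k j = p
      · rw [he]
        simp [hnd.1]
      · by_cases hm : pvQKey k j ∈ t <;> simp [he, hm]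
    rw [List.map_congr_left hsplit, PySem.List.sum_map_add_int,
        pv_sum_qkey_eq N k hk0 hkN p hp (pvDelta P k p),
        ← ih hnd.2 (fun q hq => hG q (by simp [hq]))]
    have hval : (if k = p.1 ∨ k = p.2 then pvDelta P k p else 0) = pvDelta P k p := by
      by_cases hke : k = p.1 ∨ k = p.2
      · rw [if_pos hke]
      · push_neg at hke
        rw [if_neg (by tauto), pv_delta_zero P k p hke.1 hke.2]
    rw [hval]
    simp

-- reduced forms of pvAdj when k is the winner resp. the loser
lemma pv_adj_fst (s : Int → Int) (k j : Int) (hkj : k ≠ j) :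
    pvAdj s k k j = (if s k < s j then (1 : Int) else if s k = s j then 1 else 0) := by
  unfold pvAdj
  split_ifs <;> simp_all

lemma pv_adj_snd (s : Int → Int) (k j : Int) (hkj : k ≠ j) :
    pvAdj s k j k = (if s j < s k then (-1 : Int) else 0) := by
  unfold pvAdj
  split_ifs <;> simp_all

-- balancing identities: baseline + correction = tournament outcome, per opponent
lemma pv_balance (c1 c2 sk sj : Int) :
    (if c1 - c2 > 0 then (if sk < sj then (1 : Int) else if sk = sj then 1 else 0)
     else if c1 - c2 < 0 then (if sj < sk then (-1 : Int) else 0) else 0)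
      = (if (decide (c1 > c2) || (decide (c1 = c2) && decide (sk > sj))) = true then (1 : Int) else 0)
        - (if decide (sj < sk) = true then (1 : Int) else 0) := by
  split_ifs <;> simp_all <;> omega

lemma pv_balance' (c1 c2 sk sj : Int) :
    (if c2 - c1 > 0 then (if sj < sk then (-1 : Int) else 0)
     else if c2 - c1 < 0 then (if sk < sj then (1 : Int) else if sk = sj then 1 else 0) else 0)
      = (if (decide (c1 > c2) || (decide (c1 = c2) && decide (sk > sj))) = true then (1 : Int) else 0)
        - (if decide (sj < sk) = true then (1 : Int) else 0) := by
  split_ifs <;> simp_all <;> omega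

-- pointwise: the qkey lookup term is exactly the correction the baseline needs
lemma pv_pointwise (N : Nat) (P : List (Int × Int)) (K : List (Int × Int))
    (hG : ∀ q ∈ K, 0 ≤ q.1 ∧ q.1 < q.2 ∧ q.2 < (N : Int))
    (hchar : ∀ i j : Int, 0 ≤ i → i < j → j < (N : Int) →
      ((i, j) ∈ K ↔ (i, j) ∈ P ∨ (j, i) ∈ P))
    (k j : Int) (hk0 : 0 ≤ k) (hkN : k < (N : Int)) (hj0 : 0 ≤ j) (hjN : j < (N : Int)) :
    (if pvQKey k j ∈ K then pvDelta P k (pvQKey k j) else 0)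
      = (if (j != k && pvB P k j) = true then (1 : Int) else 0)
        - (if decide (pvS P j < pvS P k) = true then (1 : Int) else 0) := by
  rcases lt_trichotomy k j with hkj | hkj | hkj
  · -- k < j : qkey = (k, j)
    have hq : pvQKey k j = (k, j) := by unfold pvQKey; rw [if_pos hkj]
    rw [hq]
    have hjk : (j != k) = true := by simp; omega
    simp only [hjk, Bool.true_and]
    by_cases hm : (k, j) ∈ K
    · rw [if_pos hm]
      simp only [pvDelta, pvDeltaC, pvB, pvC]
      rw [pv_adj_fst (pvS P) k j (by omega), pv_adj_snd (pvS P) k j (by omega)]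
      exact pv_balance _ _ _ _
    · rw [if_neg hm]
      have hchar' := hchar k j hk0 hkj hjN
      have hc1 : P.count (k, j) = 0 :=
        List.count_eq_zero.mpr (fun hc => hm (hchar'.mpr (Or.inl hc)))
      have hc2 : P.count (j, k) = 0 :=
        List.count_eq_zero.mpr (fun hc => hm (hchar'.mpr (Or.inr hc)))
      simp only [pvB, pvC, hc1, hc2, Nat.cast_zero, gt_iff_lt, lt_irrefl, decide_false,
        decide_true, Bool.false_or, Bool.true_and]
      by_cases hs : pvS P j < pvS P k <;> simp [hs]
  · -- j = k : the key is degenerate and both sides vanish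
    rw [← hkj]
    have hq : pvQKey k k = (k, k) := by unfold pvQKey; rw [if_neg (by omega)]
    rw [hq]
    have hm : (k, k) ∉ K := by
      intro hc
      have := hG _ hc
      simp only at this
      omega
    rw [if_neg hm]
    simp
  · -- j < k : qkey = (j, k)
    have hq : pvQKey k j = (j, k) := by unfold pvQKey; rw [if_neg (by omega)]
    rw [hq]
    have hjk : (j != k) = true := by simp; omega
    simp only [hjk, Bool.true_and]
    by_cases hm : (j, k) ∈ K
    · rw [if_pos hm]
      simp only [pvDelta, pvDeltaC, pvB, pvC]
      rw [pv_adj_snd (pvS P) k j (by omega), pv_adj_fst (pvS P) k j (by omega)]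
      exact pv_balance' _ _ _ _
    · rw [if_neg hm]
      have hchar' := hchar j k hj0 hkj hkN
      have hc1 : P.count (j, k) = 0 :=
        List.count_eq_zero.mpr (fun hc => hm (hchar'.mpr (Or.inl hc)))
      have hc2 : P.count (k, j) = 0 :=
        List.count_eq_zero.mpr (fun hc => hm (hchar'.mpr (Or.inr hc)))
      simp only [pvB, pvC, hc1, hc2, Nat.cast_zero, gt_iff_lt, lt_irrefl, decide_false,
        decide_true, Bool.false_or, Bool.true_and]
      by_cases hs : pvS P j < pvS P k <;> simp [hs]

-- a Bool-indicator Int sum is a countP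
lemma pv_countP_int (p : Int → Bool) (l : List Int) :
    (l.map (fun x => if p x = true then (1 : Int) else 0)).sum = ((l.countP p : Nat) : Int) := by
  induction l with
  | nil => simp
  | cons a t ih =>
    by_cases h : p a = true <;> simp [h, ih, List.countP_cons] <;> push_cast <;> ring

lemma pv_solution_alt_eq (friends gifts : List String) (h : friends ≠ []) :
    solution_alt friends gifts = pvRes friends gifts := by
  have hN : 0 < friends.length := List.length_pos_iff.mpr h
  have hPb := pv_parse_bounds friends gifts h
  have hidx : solB_idx friends = solA_mapping friends := by
    unfold solB_idx solA_mapping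
    rw [PySem.List.enumerate_eq_map_pyRange friends "", List.foldl_map]
  have hstate : solB_state friends gifts
      = ((pvP friends gifts).foldl (fun v p =>
          PySem.List.pySetD (PySem.List.pySetD v p.1 (PySem.List.pyGetD v p.1 0 + 1)) p.2
            (PySem.List.pyGetD (PySem.List.pySetD v p.1 (PySem.List.pyGetD v p.1 0 + 1)) p.2 0 - 1))
          (List.replicate friends.length (0 : Int)),
         (pvP friends gifts).foldl pvNetStep PySem.Dict.empty) := by
    have h1 : solB_state friends gifts
        = gifts.foldl (fun st g =>
            (PySem.List.pySetD (PySem.List.pySetD st.1 (pvParse (solA_mapping friends) g).1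
                (PySem.List.pyGetD st.1 (pvParse (solA_mapping friends) g).1 0 + 1))
              (pvParse (solA_mapping friends) g).2
              (PySem.List.pyGetD (PySem.List.pySetD st.1 (pvParse (solA_mapping friends) g).1
                (PySem.List.pyGetD st.1 (pvParse (solA_mapping friends) g).1 0 + 1))
                (pvParse (solA_mapping friends) g).2 0 - 1),
             pvNetStep st.2 (pvParse (solA_mapping friends) g)))
          (List.replicate friends.length (0 : Int), PySem.Dict.empty) := by
      unfold solB_state
      rw [hidx]
      apply PySem.List.foldl_congr_mem
      intro st g _
      rfl
    have hcomp1 : gifts.foldl (fun (v : List Int) g =>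
          PySem.List.pySetD (PySem.List.pySetD v (pvParse (solA_mapping friends) g).1
              (PySem.List.pyGetD v (pvParse (solA_mapping friends) g).1 0 + 1))
            (pvParse (solA_mapping friends) g).2
            (PySem.List.pyGetD (PySem.List.pySetD v (pvParse (solA_mapping friends) g).1
              (PySem.List.pyGetD v (pvParse (solA_mapping friends) g).1 0 + 1))
              (pvParse (solA_mapping friends) g).2 0 - 1))
          (List.replicate friends.length (0 : Int))
        = (pvP friends gifts).foldl (fun v p =>
            PySem.List.pySetD (PySem.List.pySetD v p.1 (PySem.List.pyGetD v p.1 0 + 1)) p.2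
              (PySem.List.pyGetD (PySem.List.pySetD v p.1 (PySem.List.pyGetD v p.1 0 + 1)) p.2 0 - 1))
            (List.replicate friends.length (0 : Int)) := by
      unfold pvP
      rw [List.foldl_map]
    have hcomp2 : gifts.foldl (fun (d : PySem.Dict (Int × Int) Int) g2 =>
          pvNetStep d (pvParse (solA_mapping friends) g2)) PySem.Dict.empty
        = (pvP friends gifts).foldl pvNetStep PySem.Dict.empty := by
      unfold pvP
      rw [List.foldl_map]
    rw [h1, PySem.List.foldl_prod_mk
      (f := fun (v : List Int) g =>
          PySem.List.pySetD (PySem.List.pySetD v (pvParse (solA_mapping friends) g).1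
              (PySem.List.pyGetD v (pvParse (solA_mapping friends) g).1 0 + 1))
            (pvParse (solA_mapping friends) g).2
            (PySem.List.pyGetD (PySem.List.pySetD v (pvParse (solA_mapping friends) g).1
              (PySem.List.pyGetD v (pvParse (solA_mapping friends) g).1 0 + 1))
              (pvParse (solA_mapping friends) g).2 0 - 1))
      (g := fun (d : PySem.Dict (Int × Int) Int) g2 =>
          pvNetStep d (pvParse (solA_mapping friends) g2)),
      hcomp1, hcomp2]
  obtain ⟨hslen, hsent⟩ := pv_score_fold friends.length (pvP friends gifts) hPb
    (List.replicate friends.length 0) (by simp)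
  have hrepl : ∀ i : Int, 0 ≤ i → i < (friends.length : Int) →
      PySem.List.pyGetD (List.replicate friends.length (0 : Int)) i 0 = 0 := by
    intro i h0 hi
    rw [PySem.List.pyGetD_eq_getElem _ _ h0 (by simpa using hi)]
    simp
  have hscent : ∀ i : Int, 0 ≤ i → i < (friends.length : Int) →
      PySem.List.pyGetD (solB_state friends gifts).1 i 0 = pvS (pvP friends gifts) i := by
    intro i h0 hi
    rw [hstate]
    rw [hsent i h0 hi, hrepl i h0 hi]
    unfold pvS
    ring
  have hsclen : (solB_state friends gifts).1.length = friends.length := by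
    rw [hstate]; exact hslen
  have hscore : (solB_state friends gifts).1
      = (PySem.List.pyRange 0 (friends.length : Int) 1).map (fun i => pvS (pvP friends gifts) i) := by
    apply List.ext_getElem
    · rw [hsclen]; simp [PySem.List.length_pyRange_one]
    · intro k hk1 hk2
      have hkN : k < friends.length := by rw [hsclen] at hk1; exact hk1
      rw [List.getElem_map, PySem.List.getElem_pyRange_one]
      have := hscent (k : Int) (by positivity) (by exact_mod_cast hkN)
      rw [PySem.List.pyGetD_eq_getElem _ 0 (by positivity)
          (by rw [hsclen]; simpa using hkN)] at this
      simpa using this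
  obtain ⟨hknd, hkG⟩ := pv_net_keys friends.length (pvP friends gifts) hPb
    PySem.Dict.empty (by simp [PySem.Dict.nodup_keys_empty]) (by simp [PySem.Dict.keys_empty])
  have hnet2 : (solB_state friends gifts).2 = (pvP friends gifts).foldl pvNetStep PySem.Dict.empty := by
    rw [hstate]
  have hitems : (solB_state friends gifts).2.items
      = ((pvP friends gifts).foldl pvNetStep PySem.Dict.empty).keys.map
          (fun q => (q, (((pvP friends gifts).count q : Nat) : Int)
            - (((pvP friends gifts).count (q.2, q.1) : Nat) : Int))) := by
    rw [hnet2, PySem.Dict.items_eq_map_keys _ hknd 0]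
    apply List.map_congr_left
    intro q hq
    rcases q with ⟨q1, q2⟩
    have hGq := hkG _ hq
    have hg := pv_net_getD (pvP friends gifts) q1 q2 hGq.2.1 PySem.Dict.empty
    rw [PySem.Dict.getD_empty] at hg
    simp only [Prod.mk.injEq, true_and]
    rw [hg]
    ring
  have hchar : ∀ i j : Int, 0 ≤ i → i < j → j < (friends.length : Int) →
      ((i, j) ∈ ((pvP friends gifts).foldl pvNetStep PySem.Dict.empty).keys
        ↔ (i, j) ∈ pvP friends gifts ∨ (j, i) ∈ pvP friends gifts) := by
    intro i j h0 hij hjN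
    rw [pv_net_mem (pvP friends gifts) i j hij PySem.Dict.empty]
    simp [PySem.Dict.keys_empty]
  have hbase_len : (solB_base (solB_state friends gifts).1).length = friends.length := by
    unfold solB_base
    rw [List.length_map, hsclen]
  have hbase_ent : ∀ k : Int, 0 ≤ k → k < (friends.length : Int) →
      PySem.List.pyGetD (solB_base (solB_state friends gifts).1) k 0
        = (((PySem.List.pyRange 0 (friends.length : Int) 1).countP
            (fun j => decide (pvS (pvP friends gifts) j < pvS (pvP friends gifts) k)) : Nat) : Int) := by
    intro k h0 hk
    have hb : solB_base (solB_state friends gifts).1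
        = (PySem.List.pyRange 0 (friends.length : Int) 1).map
            (fun i => (((PySem.List.pyRange 0 (friends.length : Int) 1).countP
              (fun j => decide (pvS (pvP friends gifts) j < pvS (pvP friends gifts) i)) : Nat) : Int)) := by
      unfold solB_base
      rw [hscore, List.map_map]
      apply List.map_congr_left
      intro i _
      simp only [Function.comp]
      rw [List.countP_map]
      rfl
    rw [hb, PySem.List.pyGetD_map_pyRange_of_nonneg _ _ _ _ h0 hk]
  have hfold : solB_wins friends gifts
      = ((solB_state friends gifts).2.items).foldl (pvWStep (pvS (pvP friends gifts)))
          (solB_base (solB_state friends gifts).1) := by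
    unfold solB_wins
    apply PySem.List.foldl_congr_mem
    intro wins pd hpd
    rw [hitems] at hpd
    obtain ⟨q, hqK, rfl⟩ := List.mem_map.mp hpd
    obtain ⟨hb1, hb2, hb3⟩ := hkG q hqK
    have e1 := hscent q.1 (by omega) (by omega)
    have e2 := hscent q.2 (by omega) (by omega)
    simp only [pvWStep, pvCAdj, solB_adjust, beq_iff_eq, e1, e2]
  have hLG : ∀ pd ∈ (solB_state friends gifts).2.items,
      0 ≤ pd.1.1 ∧ pd.1.1 < pd.1.2 ∧ pd.1.2 < ((friends.length : Nat) : Int) := by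
    intro pd hpd
    rw [hitems] at hpd
    obtain ⟨q, hqK, rfl⟩ := List.mem_map.mp hpd
    exact hkG q hqK
  obtain ⟨hwlen, hwent⟩ := pv_wins_fold friends.length (pvS (pvP friends gifts))
    ((solB_state friends gifts).2.items) hLG
    (solB_base (solB_state friends gifts).1) hbase_len
  have hwin_ent : ∀ k : Int, 0 ≤ k → k < (friends.length : Int) →
      PySem.List.pyGetD (solB_wins friends gifts) k 0
        = pvWins (pvP friends gifts) friends.length k := by
    intro k h0 hk
    rw [hfold, hwent k h0 hk, hbase_ent k h0 hk]
    have hmap : ((solB_state friends gifts).2.items).map (pvDeltaC (pvS (pvP friends gifts)) k)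
        = ((pvP friends gifts).foldl pvNetStep PySem.Dict.empty).keys.map
            (pvDelta (pvP friends gifts) k) := by
      rw [hitems, List.map_map]
      apply List.map_congr_left
      intro q _
      rfl
    rw [hmap, pv_sum_reindex friends.length (pvP friends gifts) k h0 hk _ hknd hkG]
    rw [List.map_congr_left
      (g := fun j => (if (j != k && pvB (pvP friends gifts) k j) = true then (1 : Int) else 0)
        - (if decide (pvS (pvP friends gifts) j < pvS (pvP friends gifts) k) = true then (1 : Int) else 0))
      (fun j hj => by
        rw [PySem.List.mem_pyRange_one] at hj
        exact pv_pointwise friends.length (pvP friends gifts) _ hkG hchar k j h0 hk hj.1 hj.2)]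
    rw [pv_sum_map_sub, pv_countP_int, pv_countP_int]
    unfold pvWins
    ring
  have hwl : (solB_wins friends gifts).length = friends.length := by
    rw [hfold]; exact hwlen
  have hwins : solB_wins friends gifts = (PySem.List.pyRange 0 (friends.length : Int) 1).map
      (fun i => pvWins (pvP friends gifts) friends.length i) := by
    apply List.ext_getElem
    · rw [hwl]; simp [PySem.List.length_pyRange_one]
    · intro k hk1 hk2
      have hkN : k < friends.length := by rw [hwl] at hk1; exact hk1
      rw [List.getElem_map, PySem.List.getElem_pyRange_one]
      have := hwin_ent (k : Int) (by positivity) (by exact_mod_cast hkN)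
      rw [PySem.List.pyGetD_eq_getElem _ 0 (by positivity) (by rw [hwl]; simpa using hkN)] at this
      simpa using this
  unfold solution_alt pvRes
  rw [hwins]

-- ===== VERDICT (by name: the statement is the Claim_ definition above) =====
theorem solution_spec : Claim_equal_solution := by
  intro friends gifts _ hpre
  unfold Spec_solution
  rw [pv_solution_eq friends gifts hpre.1, pv_solution_alt_eq friends gifts hpre.1]
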